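-- pv_equiv track=rewrite | github.com/Scarlet7153/sgu-cnlthd26k2-nhom07 | backend/agentic-rag-service/app/services/mongo_search_service.py | _merge_slot_docs_round_robin
-- ===== SOURCE A (Python) =====
-- from typing import Any, Dict, List, Optional
--
-- def _merge_slot_docs_round_robin(slot_buckets: List[List[Dict[str, Any]]], total_limit: int) -> List[Dict[str, Any]]:
--     if total_limit <= 0 or not slot_buckets:
--         return []
--
--     merged: List[Dict[str, Any]] = []
--     index = 0
--     progressed = True
--     while len(merged) < total_limit and progressed:
--         progressed = False
--         for bucket in slot_buckets:
--             if index >= len(bucket):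
--                 continue
--             merged.append(bucket[index])
--             progressed = True
--             if len(merged) >= total_limit:
--                 break
--         index += 1
--
--     return merged
-- ===== SOURCE B (Python) =====
-- from typing import Any, Dict, List
--
-- def _merge_slot_docs_round_robin(slot_buckets: List[List[Dict[str, Any]]], total_limit: int) -> List[Dict[str, Any]]:
--     if total_limit <= 0 or not slot_buckets:
--         return []
--     merged: List[Dict[str, Any]] = []
--     queue = [iter(bucket) for bucket in slot_buckets]
--     while queue and len(merged) < total_limit:
--         it = queue.pop(0)
--         try:
--             doc = next(it)
--         except StopIteration:
--             continue
--         merged.append(doc)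
--         queue.append(it)
--     return merged
-- ===== Notes on version B (the rewrite author's own statement) =====
-- stated objective: alternative
-- what changed: Replaces A's column-index loop with a progressed flag by the classic rotating queue of per-bucket iterators: pop an iterator off the front, take one doc, re-append it to the back, silently dropping exhausted iterators, stopping exactly at the limit.
import Mathlib
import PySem

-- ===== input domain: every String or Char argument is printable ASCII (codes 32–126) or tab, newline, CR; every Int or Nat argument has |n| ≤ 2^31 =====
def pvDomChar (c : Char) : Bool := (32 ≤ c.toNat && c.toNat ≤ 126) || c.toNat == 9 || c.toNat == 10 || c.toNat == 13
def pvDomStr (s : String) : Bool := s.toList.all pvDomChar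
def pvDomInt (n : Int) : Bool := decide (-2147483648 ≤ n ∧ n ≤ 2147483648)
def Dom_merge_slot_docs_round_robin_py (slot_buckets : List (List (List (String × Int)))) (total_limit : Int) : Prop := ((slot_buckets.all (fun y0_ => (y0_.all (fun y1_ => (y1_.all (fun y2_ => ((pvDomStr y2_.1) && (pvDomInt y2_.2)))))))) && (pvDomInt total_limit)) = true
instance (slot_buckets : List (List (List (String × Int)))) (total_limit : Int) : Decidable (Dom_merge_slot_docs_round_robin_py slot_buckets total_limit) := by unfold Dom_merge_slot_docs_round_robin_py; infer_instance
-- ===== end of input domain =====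

-- B replaces A's column-index while-loop with a progressed flag by a rotating queue of
-- per-bucket iterators (pop front, emit one doc, re-append, drop exhausted); same return value.

-- ===== PORT A =====
-- inner `for bucket in slot_buckets` loop at column `index`; state = (merged, progressed),
-- returning early mirrors the `break` once len(merged) >= total_limit
def rrInner (total_limit : Int) (index : Nat) :
    List (List (List (String × Int))) → List (List (String × Int)) → Bool →
    (List (List (String × Int)) × Bool)
  | [], merged, progressed => (merged, progressed)
  | bucket :: rest, merged, progressed =>
    if bucket.length ≤ index then rrInner total_limit index rest merged progressed
    else
      let merged' := merged ++ [bucket.getD index []]   -- bucket[index], index < len(bucket) here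
      if (merged'.length : Int) ≥ total_limit then (merged', true)
      else rrInner total_limit index rest merged' true

-- the `while len(merged) < total_limit and progressed` loop; `fuel` is only a totality
-- guard (the Python loop runs at most maxBucketLen+1 iterations; fuel is set above that)
def rrWhile (slot_buckets : List (List (List (String × Int)))) (total_limit : Int) :
    Nat → List (List (String × Int)) → Nat → Bool → List (List (String × Int))
  | 0, merged, _, _ => merged
  | fuel + 1, merged, index, progressed =>
    if (merged.length : Int) < total_limit ∧ progressed = true then
      let r := rrInner total_limit index slot_buckets merged false
      rrWhile slot_buckets total_limit fuel r.1 (index + 1) r.2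
    else merged

def merge_slot_docs_round_robin_py (slot_buckets : List (List (List (String × Int)))) (total_limit : Int) : List (List (String × Int)) :=
  if total_limit ≤ 0 ∨ slot_buckets = [] then []
  else rrWhile slot_buckets total_limit ((slot_buckets.map List.length).foldr max 0 + 2) [] 0 true

-- ===== PORT B =====
-- the `while queue and len(merged) < total_limit` loop; each iterator is modelled by the
-- list of its remaining docs; popping [] is Python's StopIteration / `continue` branch.
-- `fuel` is only a totality guard (each step shrinks queue-length + total remaining docs).
def bLoop (total_limit : Int) :
    Nat → List (List (List (String × Int))) → List (List (String × Int)) → List (List (String × Int))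
  | 0, _, merged => merged
  | fuel + 1, queue, merged =>
    match queue with
    | [] => merged
    | it :: rest =>
      if (merged.length : Int) < total_limit then
        match it with
        | [] => bLoop total_limit fuel rest merged                      -- StopIteration: continue
        | doc :: t => bLoop total_limit fuel (rest ++ [t]) (merged ++ [doc])
      else merged

def merge_slot_docs_round_robin_py_alt (slot_buckets : List (List (List (String × Int)))) (total_limit : Int) : List (List (String × Int)) :=
  if total_limit ≤ 0 ∨ slot_buckets = [] then []
  else bLoop total_limit (slot_buckets.length + (slot_buckets.map List.length).sum + 1) slot_buckets []

-- ===== PRECONDITION & SPEC =====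
def Spec_merge_slot_docs_round_robin_py (slot_buckets : List (List (List (String × Int)))) (total_limit : Int) (out : List (List (String × Int))) : Prop := out = merge_slot_docs_round_robin_py_alt slot_buckets total_limit
instance (slot_buckets : List (List (List (String × Int)))) (total_limit : Int) (out : List (List (String × Int))) : Decidable (Spec_merge_slot_docs_round_robin_py slot_buckets total_limit out) := by unfold Spec_merge_slot_docs_round_robin_py; infer_instance

-- ===== CLAIM (what is proved, stated in full; the proofs are below) =====
def Claim_equal_merge_slot_docs_round_robin_py : Prop := ∀ (slot_buckets : List (List (List (String × Int)))) (total_limit : Int), Dom_merge_slot_docs_round_robin_py slot_buckets total_limit → Spec_merge_slot_docs_round_robin_py slot_buckets total_limit (merge_slot_docs_round_robin_py slot_buckets total_limit)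

-- ===== LEMMAS AND PROOFS =====

def rrCol (slot_buckets : List (List (List (String × Int)))) (i : Nat) : List (List (String × Int)) :=
  slot_buckets.filterMap (fun b => b[i]?)

lemma rrCol_nil_iff (sb : List (List (List (String × Int)))) (i : Nat) :
    rrCol sb i = [] ↔ ∀ b ∈ sb, b.length ≤ i := by
  simp [rrCol, List.filterMap_eq_nil_iff]

lemma length_le_fold (sb : List (List (List (String × Int)))) (b : List (List (String × Int)))
    (hb : b ∈ sb) : b.length ≤ (sb.map List.length).foldr max 0 := by
  induction sb with
  | nil => cases hb
  | cons x xs ih =>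
    rcases List.mem_cons.mp hb with h | h
    · subst h; simp only [List.map_cons, List.foldr_cons]; omega
    · have := ih h; simp only [List.map_cons, List.foldr_cons]; omega

lemma take_append_take (l r : List (List (String × Int))) (t : Nat) :
    ((l.take t) ++ r).take t = (l ++ r).take t := by
  rcases le_or_gt l.length t with h | h
  · rw [List.take_of_length_le h]
  · rw [List.take_append, List.take_append, List.take_take, List.length_take]
    have h1 : min t t = t := by omega
    have h2 : t - min t l.length = 0 := by omega
    have h3 : t - l.length = 0 := by omega
    rw [h1, h2, h3]

lemma rrInner_spec (tl : Int) (i : Nat) (sb : List (List (List (String × Int))))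
    (merged : List (List (String × Int))) (p : Bool)
    (hlen : (merged.length : Int) < tl) :
    rrInner tl i sb merged p =
      ((merged ++ rrCol sb i).take tl.toNat, p || !(rrCol sb i).isEmpty) := by
  induction sb generalizing merged p with
  | nil =>
    simp only [rrInner, rrCol, List.filterMap_nil, List.append_nil, List.isEmpty_nil]
    have : merged.length ≤ tl.toNat := by omega
    rw [List.take_of_length_le this]
    simp
  | cons b rest ih =>
    by_cases hb : b.length ≤ i
    · have hget : b[i]? = none := by simpa [List.getElem?_eq_none_iff]
      simp only [rrInner, if_pos hb]
      rw [ih merged p hlen]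
      simp [rrCol, hget]
    · push_neg at hb
      have hget : b[i]? = some b[i] := List.getElem?_eq_getElem hb
      have hgetD : b.getD i [] = b[i] := by simp [List.getD, hget]
      have hcol : rrCol (b :: rest) i = b[i] :: rrCol rest i := by
        simp [rrCol, hget]
      simp only [rrInner, if_neg (by omega : ¬ b.length ≤ i), hgetD]
      by_cases hfull : ((merged ++ [b[i]]).length : Int) ≥ tl
      · have ht : tl.toNat = merged.length + 1 := by
          simp at hfull; omega
        rw [if_pos hfull, hcol]
        have : (merged ++ b[i] :: rrCol rest i).take tl.toNat = merged ++ [b[i]] := by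
          rw [ht]
          rw [show merged ++ b[i] :: rrCol rest i = (merged ++ [b[i]]) ++ rrCol rest i by simp]
          rw [List.take_append]
          simp
        simp [this]
      · rw [if_neg hfull]
        have hlen' : ((merged ++ [b[i]]).length : Int) < tl := by omega
        rw [ih _ true hlen', hcol]
        simp

lemma rrWhile_false (sb : List (List (List (String × Int)))) (tl : Int)
    (fuel : Nat) (m : List (List (String × Int))) (i : Nat) :
    rrWhile sb tl fuel m i false = m := by
  cases fuel <;> simp [rrWhile]

-- the suffix of columns from index i on
def rrRest (sb : List (List (List (String × Int)))) (i : Nat) : List (List (String × Int)) :=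
  ((List.range' i ((sb.map List.length).foldr max 0 - i)).map (rrCol sb)).flatten

lemma rrWhile_spec (sb : List (List (List (String × Int)))) (tl : Int) (htl : 0 < tl) :
    ∀ (fuel : Nat) (i : Nat) (merged : List (List (String × Int))),
    merged.length ≤ tl.toNat →
    (sb.map List.length).foldr max 0 + 1 - i ≤ fuel →
    rrWhile sb tl fuel merged i true = (merged ++ rrRest sb i).take tl.toNat := by
  intro fuel
  induction fuel with
  | zero =>
    intro i merged hm hf
    have h0 : (sb.map List.length).foldr max 0 - i = 0 := by omega
    simp [rrRest, h0, rrWhile, List.take_of_length_le hm]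
  | succ fuel ih =>
    intro i merged hm hf
    set M := (sb.map List.length).foldr max 0 with hM
    by_cases hcond : (merged.length : Int) < tl
    · rw [rrWhile, if_pos ⟨hcond, rfl⟩,
        rrInner_spec tl i sb merged false hcond]
      by_cases hcol : rrCol sb i = []
      · -- no bucket reaches column i anymore: progressed stays false, all later columns empty
        simp only [hcol, List.isEmpty_nil, Bool.not_true, Bool.false_or, List.append_nil]
        rw [rrWhile_false]
        have hrest : rrRest sb i = [] := by
          have : ∀ j ∈ List.range' i (M - i), rrCol sb j = [] := by
            intro j hj
            have hij : i ≤ j := (List.mem_range'_1.mp hj).1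
            rw [rrCol_nil_iff] at hcol ⊢
            intro b hb; exact le_trans (hcol b hb) hij
          simp only [rrRest, ← hM, List.flatten_eq_nil_iff]
          intro l hl
          rcases List.mem_map.mp hl with ⟨j, hj, rfl⟩
          exact this j hj
        rw [hrest, List.append_nil]
      · -- progressed: column i is nonempty, hence i < M and we peel one column
        have hiM : i < M := by
          rcases List.ne_nil_iff_exists_cons.mp hcol with ⟨x, xs, hx⟩
          have : ∃ b ∈ sb, ¬ b.length ≤ i := by
            by_contra hall; push_neg at hall
            exact hcol ((rrCol_nil_iff sb i).mpr hall)
          rcases this with ⟨b, hb, hbl⟩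
          have := length_le_fold sb b hb
          omega
        have hpeel : rrRest sb i = rrCol sb i ++ rrRest sb (i + 1) := by
          have : M - i = (M - (i + 1)) + 1 := by omega
          simp only [rrRest, ← hM, this, List.range'_succ, List.map_cons, List.flatten_cons]
        have hne : (rrCol sb i).isEmpty = false := by
          simp [hcol]
        simp only [hne, Bool.not_false, Bool.false_or]
        rw [ih (i + 1) _ (by simp) (by omega), hpeel]
        rw [take_append_take, List.append_assoc]
    · rw [rrWhile, if_neg (by simp [hcond])]
      have : merged.length = tl.toNat := by omega
      rw [List.take_append_of_le_length (le_of_eq this.symm), List.take_of_length_le hm]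

-- ===== the canonical value of B's rotating queue =====

-- pure round-robin of a queue: emit the head of the front iterator, rotate its tail to the back
def rrQ : List (List (List (String × Int))) → List (List (String × Int))
  | [] => []
  | [] :: rest => rrQ rest
  | (doc :: t) :: rest => doc :: rrQ (rest ++ [t])
termination_by qs => qs.length + (qs.map List.length).sum
decreasing_by
  all_goals simp [List.map_append, List.sum_append] <;> omega

def qHeads (qs : List (List (List (String × Int)))) : List (List (String × Int)) :=
  qs.filterMap List.head?

def qTails (qs : List (List (List (String × Int)))) : List (List (List (String × Int))) :=
  qs.filterMap List.tail?

-- rotation lemma: processing qs with acc already queued behind it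
lemma rrQ_rot (qs acc : List (List (List (String × Int)))) :
    rrQ (qs ++ acc) = qHeads qs ++ rrQ (acc ++ qTails qs) := by
  induction qs generalizing acc with
  | nil => simp [qHeads, qTails]
  | cons b qs' ih =>
    cases b with
    | nil => simpa [rrQ, qHeads, qTails] using ih acc
    | cons doc t =>
      have : qs' ++ acc ++ [t] = qs' ++ (acc ++ [t]) := by simp
      simp only [List.cons_append, rrQ, this, ih (acc ++ [t])]
      simp [qHeads, qTails]

lemma rrQ_step (qs : List (List (List (String × Int)))) :
    rrQ qs = qHeads qs ++ rrQ (qTails qs) := by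
  have := rrQ_rot qs []
  simpa using this

lemma rrQ_all_nil (qs : List (List (List (String × Int)))) (h : ∀ b ∈ qs, b = []) :
    rrQ qs = [] := by
  induction qs with
  | nil => simp [rrQ]
  | cons b rest ih =>
    have hb := h b (by simp)
    subst hb
    exact (by simpa [rrQ] using ih (fun b hb => h b (by simp [hb])))

lemma rrCol_zero (sb : List (List (List (String × Int)))) : rrCol sb 0 = qHeads sb := by
  simp [rrCol, qHeads, List.head?_eq_getElem?]

lemma rrCol_succ (sb : List (List (List (String × Int)))) (i : Nat) :
    rrCol sb (i + 1) = rrCol (qTails sb) i := by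
  induction sb with
  | nil => rfl
  | cons b rest ih =>
    cases b with
    | nil => simpa [rrCol, qTails] using ih
    | cons d t =>
      simp only [rrCol, qTails, List.tail?, List.filterMap_cons] at ih ⊢
      simp [ih]

lemma fold_le_iff (qs : List (List (List (String × Int)))) (n : Nat) :
    (qs.map List.length).foldr max 0 ≤ n ↔ ∀ b ∈ qs, b.length ≤ n := by
  induction qs with
  | nil => simp
  | cons b rest ih =>
    simp only [List.map_cons, List.foldr_cons, max_le_iff, ih, List.mem_cons]
    constructor
    · rintro ⟨h1, h2⟩ x hx
      rcases hx with rfl | hx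
      · exact h1
      · exact h2 x hx
    · intro h
      exact ⟨h b (Or.inl rfl), fun x hx => h x (Or.inr hx)⟩

lemma fold_tails_le (qs : List (List (List (String × Int)))) (n : Nat)
    (h : (qs.map List.length).foldr max 0 ≤ n + 1) :
    ((qTails qs).map List.length).foldr max 0 ≤ n := by
  rw [fold_le_iff] at h ⊢
  intro t ht
  rcases List.mem_filterMap.mp ht with ⟨b, hb, hbt⟩
  cases b with
  | nil => simp [List.tail?] at hbt
  | cons d t' =>
    simp only [List.tail?, Option.some.injEq] at hbt
    subst hbt
    have := h _ hb
    simp at this ⊢; omega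

-- the flattened column decomposition equals the rotating-queue order
lemma cols_eq_rrQ (n : Nat) :
    ∀ (sb : List (List (List (String × Int)))),
    (sb.map List.length).foldr max 0 ≤ n →
    ((List.range n).map (rrCol sb)).flatten = rrQ sb := by
  induction n with
  | zero =>
    intro sb h
    have : ∀ b ∈ sb, b = [] := by
      rw [fold_le_iff] at h
      intro b hb; have := h b hb; simpa [List.length_eq_zero_iff] using this
    simp [rrQ_all_nil sb this]
  | succ n ih =>
    intro sb h
    rw [List.range_succ_eq_map, List.map_cons, List.flatten_cons, List.map_map]
    have hmap : (List.range n).map (rrCol sb ∘ Nat.succ) = (List.range n).map (rrCol (qTails sb)) := by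
      apply List.map_congr_left
      intro i _
      simpa [Function.comp] using rrCol_succ sb i
    rw [hmap, ih (qTails sb) (fold_tails_le sb n h), rrCol_zero, ← rrQ_step]

-- B's loop returns the truncated rotating-queue order
lemma bLoop_spec (tl : Int) (htl : 0 < tl) :
    ∀ (fuel : Nat) (queue : List (List (List (String × Int)))) (merged : List (List (String × Int))),
    merged.length ≤ tl.toNat →
    queue.length + (queue.map List.length).sum ≤ fuel →
    bLoop tl fuel queue merged = (merged ++ rrQ queue).take tl.toNat := by
  intro fuel
  induction fuel with
  | zero =>
    intro queue merged hm hf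
    have : queue = [] := by
      cases queue with
      | nil => rfl
      | cons a b => simp at hf
    subst this
    simp [bLoop, rrQ, List.take_of_length_le hm]
  | succ fuel ih =>
    intro queue merged hm hf
    cases queue with
    | nil => simp [bLoop, rrQ, List.take_of_length_le hm]
    | cons it rest =>
      by_cases hcond : (merged.length : Int) < tl
      · cases it with
        | nil =>
          simp only [bLoop, if_pos hcond]
          rw [ih rest merged hm (by simp at hf ⊢; omega)]
          simp [rrQ]
        | cons doc t =>
          simp only [bLoop, if_pos hcond]
          have hm' : (merged ++ [doc]).length ≤ tl.toNat := by simp; omega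
          rw [ih (rest ++ [t]) (merged ++ [doc]) hm'
              (by simp [List.map_append, List.sum_append] at hf ⊢; omega)]
          simp only [rrQ]
          rw [List.append_assoc]
          rfl
      · simp only [bLoop, if_neg hcond]
        have : merged.length = tl.toNat := by omega
        rw [List.take_append_of_le_length (le_of_eq this.symm), List.take_of_length_le hm]

-- ===== VERDICT (by name: the statement is the Claim_ definition above) =====
theorem merge_slot_docs_round_robin_py_spec : Claim_equal_merge_slot_docs_round_robin_py := by
  intro sb tl _
  unfold Spec_merge_slot_docs_round_robin_py
  unfold merge_slot_docs_round_robin_py merge_slot_docs_round_robin_py_alt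
  by_cases hg : tl ≤ 0 ∨ sb = []
  · rw [if_pos hg, if_pos hg]
  · rw [if_neg hg, if_neg hg]
    push_neg at hg
    have htl : 0 < tl := by omega
    rw [rrWhile_spec sb tl htl _ 0 [] (by simp) (by omega)]
    rw [bLoop_spec tl htl _ sb [] (by simp) (by omega)]
    rw [← cols_eq_rrQ ((sb.map List.length).foldr max 0) sb le_rfl]
    simp [rrRest, List.range_eq_range']
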